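-- pv_equiv track=rewrite | github.com/sfeng-m/REAL4MWP | preprocess/equation_norm.py | filter_repeat_num
-- ===== SOURCE A (Python) =====
-- def filter_repeat_num(equ_list):
--     """过滤表达式中重复的数字，如a+b+c-b简化为a+c"""
--     i = 0
--     new_equ_list = []
--     del_index = []
--     while i < len(equ_list):
--         if i not in del_index:
--             if 'temp' in equ_list[i] and (i-1) >= 0 and equ_list[i-1] in ['+', '-'] and (i+1) < len(equ_list) and equ_list[i+1] not in ['*', '/'] and equ_list.count(equ_list[i]) > 1:
--                 unique_flag = True
--                 for j in range(i+1, len(equ_list)):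
--                     if equ_list[i] == equ_list[j] and j not in del_index and '(' not in equ_list[i:j] and ')' not in equ_list[i:j]:
--                         if (equ_list[i-1] == '+' and equ_list[j-1] == '-') or (equ_list[i-1] == '-' and equ_list[j-1] == '+'):
--                             if ((j+1) == len(equ_list)) or ((j+1) < len(equ_list) and equ_list[j+1] not in ['*', '/']):
--                                 del new_equ_list[-1]
--                                 del_index.append(j)
--                                 unique_flag = False
--                                 break
--                 if unique_flag:
--                     new_equ_list.append(equ_list[i])
--             elif i in del_index:
--                 del new_equ_list[-1]
--             else:
--                 new_equ_list.append(equ_list[i])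
--         else:
--             del new_equ_list[-1]
--         i += 1
--     return new_equ_list
-- ===== SOURCE B (Python) =====
-- def filter_repeat_num(equ_list):
--     """Remove canceling repeated temp numbers (a+b+c-b -> a+c).
--
--     Bucket-matching algorithm: precompute a parenthesis-segment id per
--     position (prefix counts of '('/')'), group the positions of each
--     'temp' token into its own bucket, match opposite-signed occurrences
--     greedily inside each bucket independently (pairs of different tokens
--     can never interact), and emit the output by one filter over the
--     dropped positions.
--     """
--     n = len(equ_list)
--     seg = []
--     s = 0
--     for tok in equ_list:
--         seg.append(s)
--         if tok in ('(', ')'):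
--             s += 1
--     buckets = {}
--     for k in range(n):
--         tok = equ_list[k]
--         if 'temp' in tok:
--             buckets.setdefault(tok, []).append(k)
--     dropped = set()
--     for pos in buckets.values():
--         if len(pos) < 2:
--             continue
--         tails = set()
--         for a, i in enumerate(pos):
--             if i in tails:
--                 continue
--             if not (i >= 1 and equ_list[i - 1] in ('+', '-') and i + 1 < n
--                     and equ_list[i + 1] not in ('*', '/')):
--                 continue
--             want = '-' if equ_list[i - 1] == '+' else '+'
--             for j in pos[a + 1:]:
--                 if (j not in tails and seg[j] == seg[i]
--                         and equ_list[j - 1] == want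
--                         and (j + 1 == n or equ_list[j + 1] not in ('*', '/'))):
--                     tails.add(j)
--                     dropped.update((i - 1, i, j - 1, j))
--                     break
--     return [equ_list[k] for k in range(n) if k not in dropped]
-- ===== Notes on version B (the rewrite author's own statement) =====
-- stated objective: alternative
-- what changed: B replaces A's single interleaved forward scan (per-index list.count, per-candidate slice scans for parentheses, a growing del_index list and in-place del on the result) by a bucket-matching algorithm: positions are grouped per temp token into buckets, a prefix-count segment id replaces the slice scans, each bucket is matched independently (justified by the fact that pairs of different tokens cannot interact), and the output is one filter over the dropped positions.
import Mathlib
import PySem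

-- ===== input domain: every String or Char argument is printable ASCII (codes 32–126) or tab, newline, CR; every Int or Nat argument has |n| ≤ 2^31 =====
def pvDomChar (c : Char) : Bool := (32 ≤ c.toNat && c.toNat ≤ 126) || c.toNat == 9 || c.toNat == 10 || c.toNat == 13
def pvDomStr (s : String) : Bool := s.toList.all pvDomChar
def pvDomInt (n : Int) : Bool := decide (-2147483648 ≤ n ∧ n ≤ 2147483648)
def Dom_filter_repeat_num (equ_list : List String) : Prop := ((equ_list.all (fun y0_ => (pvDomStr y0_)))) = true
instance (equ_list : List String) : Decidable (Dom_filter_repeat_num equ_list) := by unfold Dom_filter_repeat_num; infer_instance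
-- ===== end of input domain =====

-- B replaces A's interleaved forward scan by bucket matching: positions grouped per temp
-- token, a prefix-count segment id instead of per-candidate slice scans, each bucket
-- matched independently, and the output built by one filter (alternative algorithm).

-- ===== PORT A =====
-- the head condition of A's outer if
def pvCondA (l : List String) (i : Nat) : Bool :=
  PySem.Str.isIn "temp" (l.getD i "")
    && decide (1 ≤ i)
    && (["+", "-"] : List String).contains (l.getD (i-1) "")
    && decide (i+1 < l.length)
    && !((["*", "/"] : List String).contains (l.getD (i+1) ""))
    && decide (1 < PySem.List.count l (l.getD i ""))

-- the full condition of A's inner j-loop (break on the first j satisfying it)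
def pvPredA (l : List String) (del : List Nat) (i j : Nat) : Bool :=
  (l.getD i "" == l.getD j "")
    && !(del.contains j)
    && !((PySem.List.slice l (some (i:Int)) (some (j:Int))).contains "(")
    && !((PySem.List.slice l (some (i:Int)) (some (j:Int))).contains ")")
    && ((l.getD (i-1) "" == "+" && l.getD (j-1) "" == "-")
        || (l.getD (i-1) "" == "-" && l.getD (j-1) "" == "+"))
    && (decide (j+1 = l.length)
        || (decide (j+1 < l.length) && !((["*", "/"] : List String).contains (l.getD (j+1) ""))))

-- 'for j in range(i+1, len(equ_list)): … break' = first j in that range satisfying the condition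
def pvFindJA (l : List String) (del : List Nat) (i : Nat) : Option Nat :=
  (List.range' (i+1) (l.length - (i+1))).find? (pvPredA l del i)

-- one iteration of A's while loop, state = (new_equ_list, del_index)
def pvStepA (l : List String) (st : List String × List Nat) (i : Nat) : List String × List Nat :=
  if st.2.contains i then (st.1.dropLast, st.2)
  else if pvCondA l i then
    match pvFindJA l st.2 i with
    | some j => (st.1.dropLast, st.2 ++ [j])
    | none => (st.1 ++ [l.getD i ""], st.2)
  else if st.2.contains i then (st.1.dropLast, st.2)   -- dead 'elif' kept from the source
  else (st.1 ++ [l.getD i ""], st.2)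

def filter_repeat_num (equ_list : List String) : List String :=
  ((List.range equ_list.length).foldl (pvStepA equ_list) ([], [])).1

-- ===== PORT B =====
-- the seg-building loop: seg[k] = number of parenthesis tokens before position k
def pvSegLoop : List String → Nat → List Nat
  | [], _ => []
  | t :: rest, s => s :: pvSegLoop rest (if (["(", ")"] : List String).contains t then s + 1 else s)

-- B's head condition on a bucket element i
def pvHeadCondB (l : List String) (i : Nat) : Bool :=
  decide (1 ≤ i)
    && (["+", "-"] : List String).contains (l.getD (i-1) "")
    && decide (i+1 < l.length)
    && !((["*", "/"] : List String).contains (l.getD (i+1) ""))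

-- want = '-' if equ_list[i-1] == '+' else '+'
def pvWant (l : List String) (i : Nat) : String :=
  if l.getD (i-1) "" == "+" then "-" else "+"

-- B's tail condition on a later bucket element j
def pvTailCondB (l : List String) (seg : List Nat) (tails : PySem.Set Nat) (i j : Nat) : Bool :=
  !(PySem.Set.contains tails j)
    && (seg.getD j 0 == seg.getD i 0)
    && (l.getD (j-1) "" == pvWant l i)
    && (decide (j+1 = l.length) || !((["*", "/"] : List String).contains (l.getD (j+1) "")))

-- B's per-bucket matching loop, state = (tails, dropped)
def pvBucketLoop (l : List String) (seg : List Nat) :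
    PySem.Set Nat × PySem.Set Nat → List Nat → PySem.Set Nat × PySem.Set Nat
  | st, [] => st
  | st, i :: rest =>
    if PySem.Set.contains st.1 i then pvBucketLoop l seg st rest
    else if pvHeadCondB l i then
      match rest.find? (pvTailCondB l seg st.1 i) with
      | some j => pvBucketLoop l seg (PySem.Set.add st.1 j, PySem.Set.update st.2 [i-1, i, j-1, j]) rest
      | none => pvBucketLoop l seg st rest
    else pvBucketLoop l seg st rest

-- buckets: positions of each temp token, in order
def pvBuckets (l : List String) : PySem.Dict String (List Nat) :=
  (List.range l.length).foldl
    (fun d k => if PySem.Str.isIn "temp" (l.getD k "") then d.modify (l.getD k "") [] (· ++ [k]) else d)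
    PySem.Dict.empty

def filter_repeat_num_alt (equ_list : List String) : List String :=
  let seg := pvSegLoop equ_list 0
  let dropped := (pvBuckets equ_list).values.foldl
    (fun dropped pos =>
      if pos.length < 2 then dropped
      else (pvBucketLoop equ_list seg (PySem.Set.empty, dropped) pos).2)
    PySem.Set.empty
  (List.range equ_list.length).filterMap
    (fun k => if PySem.Set.contains dropped k then none else some (equ_list.getD k ""))

-- ===== PRECONDITION & SPEC =====
def Spec_filter_repeat_num (equ_list : List String) (out : List String) : Prop := out = filter_repeat_num_alt equ_list
instance (equ_list : List String) (out : List String) : Decidable (Spec_filter_repeat_num equ_list out) := by unfold Spec_filter_repeat_num; infer_instance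

-- ===== CLAIM (what is proved, stated in full; the proofs are below) =====
def Claim_equal_filter_repeat_num : Prop := ∀ (equ_list : List String), Dom_filter_repeat_num equ_list → Spec_filter_repeat_num equ_list (filter_repeat_num equ_list)

-- ===== LEMMAS AND PROOFS =====

-- the list of canceled pairs (head, partner) A has committed after its first i steps
def pvPairsStep (l : List String) (P : List (Nat × Nat)) (i : Nat) : List (Nat × Nat) :=
  if (P.map Prod.snd).contains i then P
  else if pvCondA l i then
    match pvFindJA l (P.map Prod.snd) i with
    | some j => P ++ [(i, j)]
    | none => P
  else P

def pvPairs (l : List String) (i : Nat) : List (Nat × Nat) :=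
  (List.range i).foldl (pvPairsStep l) []

def pvFoldA (l : List String) (i : Nat) : List String × List Nat :=
  (List.range i).foldl (pvStepA l) ([], [])

-- is index k dropped from A's result, judged after the first i steps
def pvEff (P : List (Nat × Nat)) (i k : Nat) : Bool :=
  P.any (fun p => k+1 == p.1 || k == p.1 || (k+1 == p.2 && decide (p.2 < i)) || k == p.2)

-- is index k dropped overall, P being the recorded pairs
def pvSkipP (P : List (Nat × Nat)) (k : Nat) : Bool :=
  P.any (fun p => k+1 == p.1 || k == p.1 || k+1 == p.2 || k == p.2)

-- prefix parenthesis count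
def pvPc (l : List String) (k : Nat) : Nat :=
  (l.take k).countP (fun s => s == "(" || s == ")")

-- positions of token t from index i on
def pvPosF (l : List String) (t : String) (i : Nat) : List Nat :=
  (List.range' i (l.length - i)).filter (fun k => l.getD k "" == t)

-- proof-side tail condition (pvTailCondB with the seg lookup replaced by pvPc, list tails)
def pvTailP (l : List String) (tails : List Nat) (i j : Nat) : Bool :=
  !(tails.contains j)
    && (pvPc l j == pvPc l i)
    && (l.getD (j-1) "" == pvWant l i)
    && (decide (j+1 = l.length) || !((["*", "/"] : List String).contains (l.getD (j+1) "")))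

-- proof-side pairs produced by one bucket
def pvMatch (l : List String) : List Nat → List Nat → List (Nat × Nat)
  | _, [] => []
  | tails, i :: rest =>
    if tails.contains i then pvMatch l tails rest
    else if pvHeadCondB l i then
      match rest.find? (pvTailP l tails i) with
      | some j => (i, j) :: pvMatch l (tails ++ [j]) rest
      | none => pvMatch l tails rest
    else pvMatch l tails rest

-- pairs of P whose head holds token t
def pvFT (l : List String) (t : String) (P : List (Nat × Nat)) : List (Nat × Nat) :=
  P.filter (fun p => l.getD p.1 "" == t)

-- per-pair wellformedness recorded by A's loop
def pvW (l : List String) (i : Nat) (P : List (Nat × Nat)) : Prop :=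
  ∀ p ∈ P, 1 ≤ p.1 ∧ p.1 + 2 ≤ p.2 ∧ p.2 < l.length ∧ p.1 < i
      ∧ PySem.Str.isIn "temp" (l.getD p.1 "") = true
      ∧ l.getD p.2 "" = l.getD p.1 ""
      ∧ (l.getD (p.1-1) "" = "+" ∨ l.getD (p.1-1) "" = "-")
      ∧ (l.getD (p.2-1) "" = "+" ∨ l.getD (p.2-1) "" = "-")
      ∧ 1 < PySem.List.count l (l.getD p.1 "")

-- the joint loop invariant after i steps of A
def pvInv (l : List String) (i : Nat) : Prop :=
  (pvFoldA l i).2 = (pvPairs l i).map Prod.snd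
  ∧ (pvFoldA l i).1 = (List.range i).filterMap
      (fun k => if pvEff (pvPairs l i) i k then none else some (l.getD k ""))
  ∧ pvW l i (pvPairs l i)
  ∧ (∀ p ∈ pvPairs l i, ∀ q ∈ pvPairs l i, p.2 ≠ q.1)
  ∧ (∀ t : String, PySem.Str.isIn "temp" t = true → 1 < PySem.List.count l t →
      pvFT l t (pvPairs l i)
        ++ pvMatch l ((pvFT l t (pvPairs l i)).map Prod.snd) (pvPosF l t i)
      = pvMatch l [] (pvPosF l t 0))


lemma pvContains_eq {α : Type} [BEq α] [LawfulBEq α] [DecidableEq α]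
    (s : PySem.Set α) (x : α) :
    PySem.Set.contains s x = decide (x ∈ s) := by
  rw [PySem.Set.contains_eq_listContains, List.contains_eq_mem]

lemma pv_temp_sign (s : String) (h : s = "+" ∨ s = "-") :
    PySem.Str.isIn "temp" s = false := by rcases h with rfl | rfl <;> decide

lemma pvFoldA_succ (l : List String) (i : Nat) :
    pvFoldA l (i+1) = pvStepA l (pvFoldA l i) i := by
  simp [pvFoldA, List.range_succ]

lemma pvPairs_succ (l : List String) (i : Nat) :
    pvPairs l (i+1) = pvPairsStep l (pvPairs l i) i := by
  simp [pvPairs, List.range_succ]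

lemma pvFind?_congr {α : Type} (l : List α) (p q : α → Bool)
    (h : ∀ a ∈ l, p a = q a) : l.find? p = l.find? q := by
  induction l with
  | nil => rfl
  | cons x xs ih =>
    rw [List.find?_cons, List.find?_cons, h x (List.mem_cons_self)]
    cases hqx : q x
    · exact ih (fun a ha => h a (List.mem_cons_of_mem _ ha))
    · rfl

lemma pvAny_congr {α : Type} {l : List α} {p q : α → Bool}
    (h : ∀ a ∈ l, p a = q a) : l.any p = l.any q := by
  induction l with
  | nil => rfl
  | cons x xs ih =>
    rw [List.any_cons, List.any_cons, h x List.mem_cons_self,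
      ih (fun a ha => h a (List.mem_cons_of_mem _ ha))]

lemma pvFind?_filter {α : Type} (l : List α) (p q : α → Bool)
    (h : ∀ a ∈ l, p a = true → q a = true) : l.find? p = (l.filter q).find? p := by
  induction l with
  | nil => rfl
  | cons x xs ih =>
    have ih' := ih (fun a ha => h a (List.mem_cons_of_mem _ ha))
    by_cases hqx : q x = true
    · rw [List.filter_cons_of_pos hqx, List.find?_cons, List.find?_cons]
      cases hpx : p x
      · exact ih'
      · rfl
    · have hpx : p x = false := by
        cases hp : p x
        · rfl
        · exact absurd (h x List.mem_cons_self hp) hqx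
      rw [List.filter_cons_of_neg hqx, List.find?_cons, hpx]
      exact ih' 

lemma pvIfT (s : String) : (if (true = true) then (none : Option String) else some s) = none := rfl

lemma pvIfF (s : String) : (if (false = true) then (none : Option String) else some s) = some s := rfl

lemma pvFilter_succ (f : Nat → Option String) (i : Nat) :
    (List.range (i+1)).filterMap f = (List.range i).filterMap f ++ (f i).toList := by
  rw [List.range_succ, List.filterMap_append]
  cases h : f i <;> simp [h]

-- pvPosF basics
lemma pvPosF_nil (l : List String) (t : String) (i : Nat) (h : l.length ≤ i) :
    pvPosF l t i = [] := by
  unfold pvPosF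
  rw [Nat.sub_eq_zero_of_le h]
  rfl

lemma pvPosF_step (l : List String) (t : String) (i : Nat) (h : i < l.length) :
    pvPosF l t i = (if l.getD i "" == t then [i] else []) ++ pvPosF l t (i+1) := by
  unfold pvPosF
  have h1 : l.length - i = 1 + (l.length - (i+1)) := by omega
  rw [h1, ← List.range'_append_1, List.filter_append]
  by_cases h2 : l.getD i "" = t <;> simp [List.range', List.filter_singleton, List.getD, h2]

lemma mem_pvPosF (l : List String) (t : String) (i j : Nat) :
    j ∈ pvPosF l t i ↔ (i ≤ j ∧ j < l.length ∧ l.getD j "" = t) := by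
  unfold pvPosF
  simp only [List.mem_filter, List.mem_range'_1, beq_iff_eq]
  constructor
  · rintro ⟨⟨ha, hb⟩, hc⟩
    exact ⟨ha, by omega, hc⟩
  · rintro ⟨ha, hb, hc⟩
    exact ⟨⟨ha, by omega⟩, hc⟩

lemma pvPosF_sorted (l : List String) (t : String) (i : Nat) :
    (pvPosF l t i).Pairwise (· < ·) := by
  exact List.Pairwise.sublist List.filter_sublist (List.pairwise_lt_range' 1)

lemma pvPosF_count (l : List String) (t : String) : ∀ m i, l.length - i = m →
    (pvPosF l t i).length = (l.drop i).count t := by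
  intro m
  induction m with
  | zero =>
    intro i hi
    rw [pvPosF_nil l t i (by omega), List.drop_eq_nil_of_le (by omega)]
    rfl
  | succ m ih =>
    intro i hi
    have hlt : i < l.length := by omega
    rw [pvPosF_step l t i hlt, List.drop_eq_getElem_cons hlt, List.length_append,
      ih (i+1) (by omega), List.count_cons]
    rw [List.getD_eq_getElem l "" hlt]
    cases h : (l[i] == t) <;> simp [h, Nat.add_comm]

-- pvPc: parenthesis in a slice ↔ differing prefix counts
lemma pvPc_slice (l : List String) (i j : Nat) (hij : i ≤ j) (hj : j ≤ l.length) :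
    (("(" ∈ PySem.List.slice l (some (i:Int)) (some (j:Int)))
      ∨ (")" ∈ PySem.List.slice l (some (i:Int)) (some (j:Int))))
      ↔ pvPc l i ≠ pvPc l j := by
  rw [PySem.List.slice_natCast]
  have htake : l.take j = l.take i ++ (l.drop i).take (j - i) := by
    have : l.take (i + (j - i)) = l.take i ++ (l.drop i).take (j - i) := List.take_add
    rwa [show i + (j - i) = j by omega] at this
  have hsum : pvPc l j = pvPc l i + ((l.drop i).take (j - i)).countP (fun s => s == "(" || s == ")") := by
    unfold pvPc
    rw [htake, List.countP_append]
  constructor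
  · intro h
    have : 0 < ((l.drop i).take (j - i)).countP (fun s => s == "(" || s == ")") := by
      rw [List.countP_pos_iff]
      rcases h with h | h
      · exact ⟨"(", h, by decide⟩
      · exact ⟨")", h, by decide⟩
    omega
  · intro h
    have : 0 < ((l.drop i).take (j - i)).countP (fun s => s == "(" || s == ")") := by omega
    rw [List.countP_pos_iff] at this
    obtain ⟨x, hx, hpx⟩ := this
    simp only [Bool.or_eq_true, beq_iff_eq] at hpx
    rcases hpx with rfl | rfl
    · exact Or.inl hx
    · exact Or.inr hx

-- the seg list holds the prefix parenthesis counts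
lemma pvSegLoop_getD : ∀ (l : List String) (s k : Nat), k < l.length →
    (pvSegLoop l s).getD k 0 = s + (l.take k).countP (fun x => x == "(" || x == ")") := by
  intro l
  induction l with
  | nil => intro s k h; simp at h
  | cons x rest ih =>
    intro s k h
    cases k with
    | zero => simp [pvSegLoop]
    | succ k' =>
      have hk' : k' < rest.length := by simpa using h
      show (pvSegLoop rest _).getD k' 0 = _
      rw [ih _ k' hk', List.take_succ_cons, List.countP_cons]
      have hcx : (["(", ")"] : List String).contains x = (x == "(" || x == ")") := by
        simp only [List.contains_eq_mem, List.mem_cons, List.not_mem_nil, or_false,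
          Bool.beq_eq_decide_eq, Bool.decide_or]
      rw [hcx]
      cases h2 : (x == "(" || x == ")") <;> simp <;> try omega

lemma pvSeg_getD (l : List String) (k : Nat) (h : k < l.length) :
    (pvSegLoop l 0).getD k 0 = pvPc l k := by
  rw [pvSegLoop_getD l 0 k h, Nat.zero_add]
  rfl


-- A's condition, regrouped around B's head condition
lemma pvCondA_eq (l : List String) (i : Nat) :
    pvCondA l i = (PySem.Str.isIn "temp" (l.getD i "") && pvHeadCondB l i
      && decide (1 < PySem.List.count l (l.getD i ""))) := by
  simp [pvCondA, pvHeadCondB, Bool.and_assoc]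

-- A's inner scan over the whole list equals B's scan over the bucket suffix
lemma pvFindJ_eq (l : List String) (del tails : List Nat) (i : Nat) (hi : i < l.length)
    (hsign : l.getD (i-1) "" = "+" ∨ l.getD (i-1) "" = "-")
    (hdt : ∀ j ∈ pvPosF l (l.getD i "") (i+1), del.contains j = tails.contains j) :
    pvFindJA l del i = (pvPosF l (l.getD i "") (i+1)).find? (pvTailP l tails i) := by
  unfold pvFindJA
  have himp : ∀ j ∈ List.range' (i+1) (l.length - (i+1)), pvPredA l del i j = true →
      (fun k => l.getD k "" == l.getD i "") j = true := by
    intro j _ hp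
    simp only [pvPredA, Bool.and_eq_true, beq_iff_eq] at hp
    simp only [beq_iff_eq]
    exact hp.1.1.1.1.1.symm
  rw [pvFind?_filter _ _ (fun k => l.getD k "" == l.getD i "") himp]
  have hflt : (List.range' (i+1) (l.length - (i+1))).filter (fun k => l.getD k "" == l.getD i "")
      = pvPosF l (l.getD i "") (i+1) := rfl
  rw [hflt]
  apply pvFind?_congr
  intro j hj
  obtain ⟨hij, hjn, hjt⟩ := (mem_pvPosF _ _ _ _).mp hj
  have hpc := pvPc_slice l i j (by omega) (by omega)
  unfold pvPredA pvTailP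
  rw [hdt j hj, Bool.eq_iff_iff]
  simp only [Bool.and_eq_true, Bool.not_eq_true', Bool.or_eq_true, beq_iff_eq,
    decide_eq_true_eq, and_assoc, List.contains_eq_mem, decide_eq_false_iff_not]
  constructor
  · rintro ⟨hteq, htl, hp1, hp2, hsg, hlast⟩
    refine ⟨htl, ?_, ?_, ?_⟩
    · by_contra hne
      exact (not_or.mpr ⟨hp1, hp2⟩) (hpc.mpr (fun hh => hne hh.symm))
    · unfold pvWant
      rcases hsign with hs | hs
      · rw [hs]
        rcases hsg with ⟨_, h2⟩ | ⟨h1, _⟩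
        · simpa using h2
        · rw [hs] at h1; exact absurd h1 (by decide)
      · rw [hs]
        rcases hsg with ⟨h1, _⟩ | ⟨_, h2⟩
        · rw [hs] at h1; exact absurd h1 (by decide)
        · simpa using h2
    · rcases hlast with h | ⟨_, h⟩
      · exact Or.inl h
      · exact Or.inr h
  · rintro ⟨htl, hpceq, hwant, hlast⟩
    have hnp : ¬ (("(" ∈ PySem.List.slice l (some (i:Int)) (some (j:Int)))
        ∨ (")" ∈ PySem.List.slice l (some (i:Int)) (some (j:Int)))) := by
      rw [hpc]
      omega
    rw [not_or] at hnp
    refine ⟨hjt.symm, htl, hnp.1, hnp.2, ?_, ?_⟩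
    · unfold pvWant at hwant
      rcases hsign with hs | hs
      · rw [hs] at hwant ⊢
        exact Or.inl ⟨rfl, by simpa using hwant⟩
      · rw [hs] at hwant ⊢
        exact Or.inr ⟨rfl, by simpa using hwant⟩
    · rcases hlast with h | h
      · exact Or.inl h
      · by_cases hjn' : j + 1 = l.length
        · exact Or.inl hjn'
        · exact Or.inr ⟨by omega, h⟩

-- index i-1 (a first sign) is not yet dropped when step i runs
lemma pvEff_false_sign (l : List String) (P : List (Nat × Nat)) (i : Nat)
    (hi : 1 ≤ i)
    (hsign : l.getD (i-1) "" = "+" ∨ l.getD (i-1) "" = "-")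
    (htemp : ∀ p ∈ P, PySem.Str.isIn "temp" (l.getD p.1 "") = true
        ∧ l.getD p.2 "" = l.getD p.1 "")
    (hne : ∀ p ∈ P, p.1 ≠ i) :
    pvEff P i (i-1) = false := by
  rw [Bool.eq_false_iff]
  intro hb
  simp only [pvEff, List.any_eq_true, Bool.or_eq_true, or_assoc, Bool.and_eq_true,
    beq_iff_eq, decide_eq_true_eq] at hb
  obtain ⟨p, hp, h | h | ⟨h, hlt⟩ | h⟩ := hb
  · exact hne p hp (by omega)
  · have h1 := (htemp p hp).1
    have h3 : PySem.Str.isIn "temp" (l.getD (i-1) "") = true := by rw [h]; exact h1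
    rw [pv_temp_sign _ hsign] at h3
    exact absurd h3 (by simp)
  · omega
  · have h1 := (htemp p hp).1
    have h2 := (htemp p hp).2
    have h3 : PySem.Str.isIn "temp" (l.getD (i-1) "") = true := by rw [h, h2]; exact h1
    rw [pv_temp_sign _ hsign] at h3
    exact absurd h3 (by simp)

-- index i itself is not dropped when it is neither a head nor a recorded partner
lemma pvEff_false_cur (P : List (Nat × Nat)) (i : Nat)
    (hlt : ∀ p ∈ P, p.1 < i) (htail : ∀ p ∈ P, p.2 ≠ i) :
    pvEff P (i+1) i = false := by
  rw [Bool.eq_false_iff]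
  intro hb
  simp only [pvEff, List.any_eq_true, Bool.or_eq_true, or_assoc, Bool.and_eq_true,
    beq_iff_eq, decide_eq_true_eq] at hb
  obtain ⟨p, hp, h | h | ⟨h, hlt'⟩ | h⟩ := hb
  · have := hlt p hp; omega
  · have := hlt p hp; omega
  · omega
  · exact htail p hp h.symm

-- moving to the next stage changes pvEff only below a partner recorded at i
lemma pvEff_congr_step (P : List (Nat × Nat)) (i k : Nat)
    (h : ∀ p ∈ P, k + 1 = p.2 → p.2 ≠ i) :
    pvEff P (i+1) k = pvEff P i k := by
  unfold pvEff
  apply pvAny_congr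
  intro p hp
  by_cases hk : k + 1 = p.2
  · have hne : p.2 ≠ i := h p hp hk
    have hd : decide (p.2 < i + 1) = decide (p.2 < i) := by
      rw [decide_eq_decide]; omega
    rw [hd]
  · have hf : (k + 1 == p.2) = false := by simpa using hk
    rw [hf]
    simp

-- appending a fresh pair (a, b) adds exactly its four clauses
lemma pvEff_append (P : List (Nat × Nat)) (a b s k : Nat) :
    pvEff (P ++ [(a, b)]) s k =
      (pvEff P s k || (k+1 == a || k == a || (k+1 == b && decide (b < s)) || k == b)) := by
  simp [pvEff, List.any_append]

lemma pvSkipP_cons (p : Nat × Nat) (P : List (Nat × Nat)) (k : Nat) :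
    pvSkipP (p :: P) k =
      ((k+1 == p.1 || k == p.1 || k+1 == p.2 || k == p.2) || pvSkipP P k) := by
  simp [pvSkipP]

-- at the final stage pvEff is exactly pvSkipP
lemma pvEff_top (P : List (Nat × Nat)) (n k : Nat) (h : ∀ p ∈ P, p.2 < n) :
    pvEff P n k = pvSkipP P k := by
  unfold pvEff pvSkipP
  apply pvAny_congr
  intro p hp
  have hd : decide (p.2 < n) = true := by simpa using h p hp
  rw [hd, Bool.and_true]


-- unfolding lemmas for pvMatch
lemma pvMatch_cons_skip (l : List String) (tails : List Nat) (i : Nat) (rest : List Nat)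
    (h : tails.contains i = true) :
    pvMatch l tails (i :: rest) = pvMatch l tails rest := by
  simp only [pvMatch]
  rw [if_pos h]

lemma pvMatch_cons_nohead (l : List String) (tails : List Nat) (i : Nat) (rest : List Nat)
    (h1 : tails.contains i = false) (h2 : pvHeadCondB l i = false) :
    pvMatch l tails (i :: rest) = pvMatch l tails rest := by
  simp only [pvMatch]
  rw [if_neg (by simpa using h1), if_neg (by simp [h2])]

lemma pvMatch_cons_found (l : List String) (tails : List Nat) (i j : Nat) (rest : List Nat)
    (h1 : tails.contains i = false) (h2 : pvHeadCondB l i = true)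
    (h3 : rest.find? (pvTailP l tails i) = some j) :
    pvMatch l tails (i :: rest) = (i, j) :: pvMatch l (tails ++ [j]) rest := by
  simp only [pvMatch]
  rw [if_neg (by simpa using h1), if_pos h2, h3]

lemma pvMatch_cons_none (l : List String) (tails : List Nat) (i : Nat) (rest : List Nat)
    (h1 : tails.contains i = false) (h2 : pvHeadCondB l i = true)
    (h3 : rest.find? (pvTailP l tails i) = none) :
    pvMatch l tails (i :: rest) = pvMatch l tails rest := by
  simp only [pvMatch]
  rw [if_neg (by simpa using h1), if_pos h2, h3]

-- tails of the token-t pairs agree with the global del list on positions of token t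
lemma pvDelTails (l : List String) (P : List (Nat × Nat)) (t : String)
    (hWeq : ∀ p ∈ P, l.getD p.2 "" = l.getD p.1 "")
    (j : Nat) (hjt : l.getD j "" = t) :
    (P.map Prod.snd).contains j = ((pvFT l t P).map Prod.snd).contains j := by
  simp only [List.contains_eq_mem, decide_eq_decide, List.mem_map, pvFT, List.mem_filter,
    beq_iff_eq]
  constructor
  · rintro ⟨p, hp, rfl⟩
    exact ⟨p, ⟨hp, by rw [← hWeq p hp, hjt]⟩, rfl⟩
  · rintro ⟨p, ⟨hp, _⟩, rfl⟩
    exact ⟨p, hp, rfl⟩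

lemma pvInv_holds (l : List String) : ∀ i, pvInv l i := by
  intro i
  induction i with
  | zero =>
    refine ⟨rfl, rfl, ?_, ?_, ?_⟩
    · intro p hp; simp [pvPairs] at hp
    · intro p hp; simp [pvPairs] at hp
    · intro t _ _
      simp [pvPairs, pvFT]
  | succ i ih =>
    obtain ⟨hdel, hnew, hW, hW4, hH⟩ := ih
    set P := pvPairs l i with hPdef
    have hstepP : pvPairs l (i+1) = pvPairsStep l P i := pvPairs_succ l i
    have hWlt : ∀ p ∈ P, p.1 < i := fun p hp => (hW p hp).2.2.2.1
    have hWeq : ∀ p ∈ P, l.getD p.2 "" = l.getD p.1 "" :=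
      fun p hp => (hW p hp).2.2.2.2.2.1
    have hPosF_ne : ∀ t : String, (l.length ≤ i ∨ l.getD i "" ≠ t) →
        pvPosF l t i = pvPosF l t (i+1) := by
      intro t ht
      by_cases hl : i < l.length
      · rcases ht with ht | ht
        · omega
        · rw [pvPosF_step l t i hl, if_neg (by simpa using ht)]
          simp
      · rw [pvPosF_nil l t i (by omega), pvPosF_nil l t (i+1) (by omega)]
    by_cases htail : ∃ p ∈ P, p.2 = i
    · -- step i deletes the second sign of an earlier pair
      obtain ⟨p0, hp0, hp0i⟩ := htail
      have hi1 : 1 ≤ i := by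
        have h1 := (hW p0 hp0).1
        have h2 := (hW p0 hp0).2.1
        omega
      have hcont : (P.map Prod.snd).contains i = true := by
        simp only [List.contains_eq_mem, decide_eq_true_eq, List.mem_map]
        exact ⟨p0, hp0, hp0i⟩
      have hstepA : pvFoldA l (i+1) = ((pvFoldA l i).1.dropLast, (pvFoldA l i).2) := by
        rw [pvFoldA_succ]; unfold pvStepA
        rw [hdel, if_pos hcont]
      have hstepPeq : pvPairs l (i+1) = P := by
        rw [hstepP]; unfold pvPairsStep
        rw [if_pos hcont]
      refine ⟨?_, ?_, ?_, ?_, ?_⟩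
      · rw [hstepA, hstepPeq]; exact hdel
      · rw [hstepA, hstepPeq]
        obtain ⟨i', rfl⟩ : ∃ i', i = i' + 1 := ⟨i - 1, by omega⟩
        have hsign : l.getD i' "" = "+" ∨ l.getD i' "" = "-" := by
          have h8 := (hW p0 hp0).2.2.2.2.2.2.2.1
          rw [hp0i] at h8
          simpa using h8
        have htempP : ∀ p ∈ P, PySem.Str.isIn "temp" (l.getD p.1 "") = true
            ∧ l.getD p.2 "" = l.getD p.1 "" :=
          fun p hp => ⟨(hW p hp).2.2.2.2.1, (hW p hp).2.2.2.2.2.1⟩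
        have hhne : ∀ p ∈ P, p.1 ≠ i' + 1 := by
          intro p hp h
          exact hW4 p0 hp0 p hp (by omega)
        have heffA : pvEff P (i'+1) i' = false := by
          have := pvEff_false_sign l P (i'+1) (by omega) (by simpa using hsign) htempP hhne
          simpa using this
        have heffB1 : pvEff P (i'+2) (i'+1) = true := by
          simp only [pvEff, List.any_eq_true]
          exact ⟨p0, hp0, by simp [hp0i]⟩
        have heffB2 : pvEff P (i'+2) i' = true := by
          simp only [pvEff, List.any_eq_true]
          exact ⟨p0, hp0, by simp [hp0i]⟩
        rw [hnew, pvFilter_succ]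
        rw [show i' + 1 + 1 = i' + 2 from rfl, pvFilter_succ, pvFilter_succ]
        rw [heffA, heffB1, heffB2, pvIfT, pvIfT, pvIfF]
        simp only [Option.toList_some, Option.toList_none, List.append_nil]
        rw [List.dropLast_concat]
        apply List.filterMap_congr
        intro k hk
        rw [List.mem_range] at hk
        have hcg : pvEff P (i'+1+1) k = pvEff P (i'+1) k := by
          apply pvEff_congr_step
          intro p hp h
          omega
        rw [show i' + 2 = i' + 1 + 1 from rfl, hcg]
      · rw [hstepPeq]
        intro p hp
        have := hW p hp
        exact ⟨this.1, this.2.1, this.2.2.1, by omega, this.2.2.2.2⟩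
      · rw [hstepPeq]; exact hW4
      · rw [hstepPeq]
        intro t htemp hcount
        by_cases hti : l.getD i "" = t
        · subst hti
          have hilen : i < l.length := by
            have := (hW p0 hp0).2.2.1
            omega
          have hHt := hH _ htemp hcount
          rw [pvPosF_step l _ i hilen, if_pos (by simp), List.singleton_append,
            pvMatch_cons_skip _ _ _ _ ?_] at hHt
          · exact hHt
          · rw [← pvDelTails l P _ hWeq i rfl]
            exact hcont
        · have hne := hPosF_ne t (by
            by_cases hl : i < l.length
            · exact Or.inr hti
            · exact Or.inl (by omega))
          have hHt := hH t htemp hcount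
          rw [hne] at hHt
          exact hHt
    · -- i is not a recorded partner
      have htail' : ∀ p ∈ P, p.2 ≠ i := by
        intro p hp h
        exact htail ⟨p, hp, h⟩
      have hncP : (P.map Prod.snd).contains i = false := by
        simp only [List.contains_eq_mem, decide_eq_false_iff_not, List.mem_map]
        rintro ⟨p, hp, hpi⟩
        exact htail' p hp hpi
      have hkeep : (pvFoldA l i).1 ++ [l.getD i ""] = (List.range (i+1)).filterMap
          (fun k => if pvEff P (i+1) k then none else some (l.getD k "")) := by
        rw [pvFilter_succ, pvEff_false_cur P i hWlt htail', pvIfF]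
        simp only [Option.toList_some]
        rw [hnew]
        congr 1
        apply List.filterMap_congr
        intro k hk
        rw [List.mem_range] at hk
        have hcg : pvEff P (i+1) k = pvEff P i k := by
          apply pvEff_congr_step
          intro p hp _
          exact htail' p hp
        rw [hcg]
      have hWsucc : pvW l (i+1) P := by
        intro p hp
        have := hW p hp
        exact ⟨this.1, this.2.1, this.2.2.1, by omega, this.2.2.2.2⟩
      have hdtails : ∀ t : String, ∀ j ∈ pvPosF l t (i+1),
          (P.map Prod.snd).contains j = ((pvFT l t P).map Prod.snd).contains j := by
        intro t j hj
        obtain ⟨_, _, hjt⟩ := (mem_pvPosF _ _ _ _).mp hj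
        exact pvDelTails l P t hWeq j hjt
      have hc1 : ∀ t : String, l.getD i "" = t →
          ((pvFT l t P).map Prod.snd).contains i = false := by
        intro t ht
        rw [← pvDelTails l P t hWeq i ht]
        exact hncP
      by_cases hcondA : pvCondA l i = true
      · have hcond' := hcondA
        rw [pvCondA_eq] at hcond'
        simp only [Bool.and_eq_true, decide_eq_true_eq] at hcond'
        obtain ⟨⟨htempi, hheadB⟩, hcnti⟩ := hcond'
        have hhb' : pvHeadCondB l i = true := hheadB
        have hhbparts := hheadB
        rw [pvHeadCondB] at hhbparts
        simp only [Bool.and_eq_true, decide_eq_true_eq, Bool.not_eq_true',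
          List.contains_eq_mem, decide_eq_false_iff_not] at hhbparts
        obtain ⟨⟨⟨hig1, hsigni⟩, hlen1⟩, _⟩ := hhbparts
        have hilen : i < l.length := by omega
        have hsigni' : l.getD (i-1) "" = "+" ∨ l.getD (i-1) "" = "-" := by
          simpa using hsigni
        have hfind_eq : pvFindJA l (P.map Prod.snd) i
            = (pvPosF l (l.getD i "") (i+1)).find?
                (pvTailP l ((pvFT l (l.getD i "") P).map Prod.snd) i) :=
          pvFindJ_eq l _ _ i hilen hsigni' (hdtails (l.getD i ""))
        cases hj : pvFindJA l (P.map Prod.snd) i with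
        | none =>
          have hstepA : pvFoldA l (i+1) = ((pvFoldA l i).1 ++ [l.getD i ""], (pvFoldA l i).2) := by
            rw [pvFoldA_succ]; unfold pvStepA
            rw [hdel, if_neg (by rw [hncP]; exact Bool.false_ne_true), if_pos hcondA, hj]
          have hstepPeq : pvPairs l (i+1) = P := by
            rw [hstepP]; unfold pvPairsStep
            rw [if_neg (by rw [hncP]; exact Bool.false_ne_true), if_pos hcondA, hj]
          refine ⟨?_, ?_, ?_, ?_, ?_⟩
          · rw [hstepA, hstepPeq]; exact hdel
          · rw [hstepA, hstepPeq]; exact hkeep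
          · rw [hstepPeq]; exact hWsucc
          · rw [hstepPeq]; exact hW4
          · rw [hstepPeq]
            intro t htemp hcount
            by_cases hti : l.getD i "" = t
            · subst hti
              have hHt := hH _ htemp hcount
              rw [hfind_eq] at hj
              rw [pvPosF_step l _ i hilen, if_pos (by simp), List.singleton_append,
                pvMatch_cons_none _ _ _ _ (hc1 _ rfl) hhb' hj] at hHt
              exact hHt
            · have hne := hPosF_ne t (Or.inr hti)
              have hHt := hH t htemp hcount
              rw [hne] at hHt
              exact hHt
        | some j =>
          have hstepA : pvFoldA l (i+1)
              = ((pvFoldA l i).1.dropLast, (pvFoldA l i).2 ++ [j]) := by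
            rw [pvFoldA_succ]; unfold pvStepA
            rw [hdel, if_neg (by rw [hncP]; exact Bool.false_ne_true), if_pos hcondA, hj]
          have hstepPeq : pvPairs l (i+1) = P ++ [(i, j)] := by
            rw [hstepP]; unfold pvPairsStep
            rw [if_neg (by rw [hncP]; exact Bool.false_ne_true), if_pos hcondA, hj]
          -- facts about j from the found match
          have hjmem := List.mem_of_find?_eq_some hj
          rw [List.mem_range'_1] at hjmem
          have hjlt : j < l.length := by omega
          have hjgt : i + 1 ≤ j := hjmem.1
          have hpred := List.find?_some hj
          simp only [pvPredA, Bool.and_eq_true, and_assoc, Bool.or_eq_true,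
            Bool.not_eq_true', List.contains_eq_mem, decide_eq_false_iff_not,
            beq_iff_eq, decide_eq_true_eq] at hpred
          obtain ⟨heqj, hjdel, _, _, hsgpair, hjlast⟩ := hpred
          have hsignj : l.getD (j-1) "" = "+" ∨ l.getD (j-1) "" = "-" := by
            rcases hsgpair with ⟨_, h⟩ | ⟨_, h⟩
            · exact Or.inr h
            · exact Or.inl h
          have hj2 : i + 2 ≤ j := by
            by_contra hcon
            have hji : j - 1 = i := by omega
            have hsi : l.getD i "" = "+" ∨ l.getD i "" = "-" := by
              rw [← hji]; exact hsignj
            have h2 := pv_temp_sign _ hsi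
            rw [htempi] at h2
            exact absurd h2 (by simp)
          refine ⟨?_, ?_, ?_, ?_, ?_⟩
          · rw [hstepA, hstepPeq]; simp [hdel]
          · rw [hstepA, hstepPeq]
            obtain ⟨i', rfl⟩ : ∃ i', i = i' + 1 := ⟨i - 1, by omega⟩
            have htempP : ∀ p ∈ P, PySem.Str.isIn "temp" (l.getD p.1 "") = true
                ∧ l.getD p.2 "" = l.getD p.1 "" :=
              fun p hp => ⟨(hW p hp).2.2.2.2.1, (hW p hp).2.2.2.2.2.1⟩
            have hhne : ∀ p ∈ P, p.1 ≠ i' + 1 := by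
              intro p hp
              have := hWlt p hp
              omega
            have heffA : pvEff P (i'+1) i' = false := by
              have := pvEff_false_sign l P (i'+1) (by omega) (by simpa using hsigni')
                htempP hhne
              simpa using this
            have heffB1 : pvEff (P ++ [(i'+1, j)]) (i'+2) (i'+1) = true := by
              rw [pvEff_append]; simp
            have heffB2 : pvEff (P ++ [(i'+1, j)]) (i'+2) i' = true := by
              rw [pvEff_append]; simp
            rw [hnew, pvFilter_succ]
            rw [show i' + 1 + 1 = i' + 2 from rfl, pvFilter_succ, pvFilter_succ]
            rw [heffA, heffB1, heffB2, pvIfT, pvIfT, pvIfF]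
            simp only [Option.toList_some, Option.toList_none, List.append_nil]
            rw [List.dropLast_concat]
            apply List.filterMap_congr
            intro k hk
            rw [List.mem_range] at hk
            have hnewcl : pvEff (P ++ [(i'+1, j)]) (i'+2) k = pvEff P (i'+2) k := by
              rw [pvEff_append]
              have h1 : (k+1 == i'+1) = false := by simp; omega
              have h2 : (k == i'+1) = false := by simp; omega
              have h3 : (k+1 == j) = false := by simp; omega
              have h4 : (k == j) = false := by simp; omega
              rw [h1, h2, h3, h4]
              simp
            have hcg : pvEff P (i'+1+1) k = pvEff P (i'+1) k :=
              pvEff_congr_step P (i'+1) k (fun p hp _ => htail' p hp)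
            rw [show i' + 2 = i' + 1 + 1 from rfl] at hnewcl ⊢
            rw [hnewcl, hcg]
          · rw [hstepPeq]
            intro p hp
            rw [List.mem_append] at hp
            rcases hp with hp | hp
            · exact hWsucc p hp
            · simp only [List.mem_singleton] at hp
              subst hp
              exact ⟨hig1, hj2, hjlt, by omega, htempi, heqj.symm, hsigni', hsignj, hcnti⟩
          · rw [hstepPeq]
            intro p hp q hq
            rw [List.mem_append] at hp hq
            rcases hp with hp | hp <;> rcases hq with hq | hq
            · exact hW4 p hp q hq
            · simp only [List.mem_singleton] at hq
              subst hq
              intro h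
              exact htail' p hp (by simpa using h)
            · simp only [List.mem_singleton] at hp
              subst hp
              have := hWlt q hq
              simp only
              omega
            · simp only [List.mem_singleton] at hp hq
              subst hp; subst hq
              simp only
              omega
          · rw [hstepPeq]
            intro t htemp hcount
            by_cases hti : l.getD i "" = t
            · subst hti
              have hHt := hH _ htemp hcount
              rw [hfind_eq] at hj
              rw [pvPosF_step l _ i hilen, if_pos (by simp), List.singleton_append,
                pvMatch_cons_found _ _ _ _ _ (hc1 _ rfl) hhb' hj] at hHt
              have hFT' : pvFT l (l.getD i "") (P ++ [(i, j)])
                  = pvFT l (l.getD i "") P ++ [(i, j)] := by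
                simp [pvFT, List.filter_append]
              rw [hFT', List.map_append, List.append_assoc]
              simpa using hHt
            · have hFT' : pvFT l t (P ++ [(i, j)]) = pvFT l t P := by
                unfold pvFT
                rw [List.filter_append, List.filter_singleton]
                have hb : (l.getD (i, j).1 "" == t) = false := by simpa using hti
                rw [hb]
                simp
              have hne := hPosF_ne t (Or.inr hti)
              have hHt := hH t htemp hcount
              rw [hne] at hHt
              rw [hFT']
              exact hHt
      · have hcondF : pvCondA l i = false := by simpa using hcondA
        have hstepA : pvFoldA l (i+1) = ((pvFoldA l i).1 ++ [l.getD i ""], (pvFoldA l i).2) := by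
          rw [pvFoldA_succ]; unfold pvStepA
          rw [hdel, if_neg (by rw [hncP]; exact Bool.false_ne_true), if_neg (by rw [hcondF]; exact Bool.false_ne_true), if_neg (by rw [hncP]; exact Bool.false_ne_true)]
        have hstepPeq : pvPairs l (i+1) = P := by
          rw [hstepP]; unfold pvPairsStep
          rw [if_neg (by rw [hncP]; exact Bool.false_ne_true), if_neg (by rw [hcondF]; exact Bool.false_ne_true)]
        refine ⟨?_, ?_, ?_, ?_, ?_⟩
        · rw [hstepA, hstepPeq]; exact hdel
        · rw [hstepA, hstepPeq]; exact hkeep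
        · rw [hstepPeq]; exact hWsucc
        · rw [hstepPeq]; exact hW4
        · rw [hstepPeq]
          intro t htemp hcount
          by_cases hti : l.getD i "" = t
          · subst hti
            have hilen : i < l.length := by
              by_contra hx
              have hx' : l.getD i "" = "" := by
                simp [List.getD_eq_getElem?_getD, List.getElem?_eq_none (by omega : l.length ≤ i)]
              rw [hx'] at htemp
              exact absurd htemp (by decide)
            have hhb : pvHeadCondB l i = false := by
              cases hx : pvHeadCondB l i
              · rfl
              · rw [pvCondA_eq, htemp, hx] at hcondF
                simp only [Bool.true_and, decide_eq_false_iff_not, not_lt] at hcondF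
                omega
            have hHt := hH _ htemp hcount
            rw [pvPosF_step l _ i hilen, if_pos (by simp), List.singleton_append,
              pvMatch_cons_nohead _ _ _ _ (hc1 _ rfl) hhb] at hHt
            exact hHt
          · have hne := hPosF_ne t (Or.inr hti)
            have hHt := hH t htemp hcount
            rw [hne] at hHt
            exact hHt


-- A's result, characterized by the final pair list
lemma pvA_char (l : List String) :
    filter_repeat_num l = (List.range l.length).filterMap
      (fun k => if pvSkipP (pvPairs l l.length) k then none else some (l.getD k "")) := by
  obtain ⟨_, hnew, hW, _, _⟩ := pvInv_holds l l.length
  have hA : filter_repeat_num l = (pvFoldA l l.length).1 := rfl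
  rw [hA, hnew]
  apply List.filterMap_congr
  intro k _
  rw [pvEff_top _ _ _ (fun p hp => (hW p hp).2.2.1)]

-- at the final stage the token-t pairs are exactly the bucket matching of token t
lemma pvH_final (l : List String) (t : String)
    (htemp : PySem.Str.isIn "temp" t = true) (hcount : 1 < PySem.List.count l t) :
    pvFT l t (pvPairs l l.length) = pvMatch l [] (pvPosF l t 0) := by
  obtain ⟨_, _, _, _, hH⟩ := pvInv_holds l l.length
  have h := hH t htemp hcount
  rw [pvPosF_nil l t l.length (le_refl _),
    show pvMatch l ((pvFT l t (pvPairs l l.length)).map Prod.snd) [] = [] from rfl,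
    List.append_nil] at h
  exact h

-- a fold whose body is guarded by 'if p x' is a fold over the filtered list
lemma pvFoldl_if {α β : Type} (p : α → Bool) (f : β → α → β) :
    ∀ (xs : List α) (d : β),
      xs.foldl (fun d x => if p x then f d x else d) d = (xs.filter p).foldl f d := by
  intro xs
  induction xs with
  | nil => intro d; rfl
  | cons x rest ih =>
    intro d
    rw [List.foldl_cons, List.filter_cons]
    cases hx : p x
    · simp only [Bool.false_eq_true, if_false]
      exact ih d
    · simp only [if_true]
      exact ih (f d x)

-- the bucket dict, reshaped as a fold over (token, position) pairs
lemma pvBuckets_eq (l : List String) :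
    pvBuckets l = ((((List.range l.length).filter
        (fun k => PySem.Str.isIn "temp" (l.getD k ""))).map
          (fun k => (l.getD k "", k))).foldl
            (fun d p => d.modify p.1 [] (· ++ [p.2])) PySem.Dict.empty) := by
  unfold pvBuckets
  rw [pvFoldl_if, List.foldl_map]

lemma pvBuckets_getD (l : List String) (t : String)
    (htemp : PySem.Str.isIn "temp" t = true) :
    (pvBuckets l).getD t [] = pvPosF l t 0 := by
  rw [pvBuckets_eq, PySem.Dict.getD_foldl_modify_append, PySem.Dict.getD_empty,
    List.filter_map, List.map_map]
  have h1 : ((List.range l.length).filter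
        (fun k => PySem.Str.isIn "temp" (l.getD k ""))).filter
          ((fun p => p.1 == t) ∘ (fun k => (l.getD k "", k)))
      = (List.range l.length).filter (fun k => l.getD k "" == t) := by
    rw [List.filter_filter]
    apply List.filter_congr
    intro k _
    simp only [Function.comp_apply]
    cases hk : (l.getD k "" == t)
    · simp
    · have hkt : l.getD k "" = t := by simpa using hk
      have ht2 : PySem.Str.isIn "temp" (l.getD k "") = true := by rw [hkt]; exact htemp
      rw [ht2]
      rfl
  rw [h1]
  have h2 : pvPosF l t 0 = (List.range l.length).filter (fun k => l.getD k "" == t) := by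
    unfold pvPosF
    rw [Nat.sub_zero, List.range_eq_range']
  rw [h2]
  have h3 : ((fun (x : String × Nat) => x.2) ∘ fun k => (l.getD k "", k)) = id := rfl
  rw [h3, List.map_id, List.nil_append]

lemma pvBuckets_nodup (l : List String) : (pvBuckets l).keys.Nodup := by
  rw [pvBuckets_eq]
  exact PySem.Dict.nodup_keys_foldl_modify_key _ _ _ _ _ (by simp [PySem.Dict.nodup_keys_empty])

lemma pvBuckets_mem_keys (l : List String) (t : String) :
    t ∈ (pvBuckets l).keys
      ↔ (PySem.Str.isIn "temp" t = true ∧ ∃ k, k < l.length ∧ l.getD k "" = t) := by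
  rw [pvBuckets_eq, PySem.Dict.keys_foldl_modify_key]
  rw [show (PySem.Dict.empty : PySem.Dict String (List Nat)).keys = [] from rfl]
  rw [PySem.Set.update_nil_left]
  rw [PySem.Set.mem_ofList]
  simp only [List.map_map, List.mem_map, List.mem_filter, List.mem_range, Function.comp]
  constructor
  · rintro ⟨k, ⟨hk, hkt⟩, rfl⟩
    exact ⟨hkt, k, hk, rfl⟩
  · rintro ⟨ht, k, hk, rfl⟩
    exact ⟨k, ⟨hk, ht⟩, rfl⟩

lemma pvBuckets_values (l : List String) :
    (pvBuckets l).values = (pvBuckets l).keys.map (fun t => (pvBuckets l).getD t []) :=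
  PySem.Dict.values_eq_map_keys _ (pvBuckets_nodup l) []

-- a bucket's length is the token's count
lemma pvPosF_len (l : List String) (t : String) :
    (pvPosF l t 0).length = PySem.List.count l t := by
  rw [pvPosF_count l t (l.length - 0) 0 rfl, List.drop_zero, PySem.List.count_eq]


-- B's set-based bucket loop computes pvSkipP of the proof-side matching
lemma pvBucket_contains (l : List String) :
    ∀ (pos : List Nat) (s d : PySem.Set Nat) (ts : List Nat),
      (∀ x ∈ pos, x < l.length) → pos.Pairwise (· < ·) →
      (∀ x, PySem.Set.contains s x = ts.contains x) →
      ∀ k, PySem.Set.contains (pvBucketLoop l (pvSegLoop l 0) (s, d) pos).2 k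
        = (PySem.Set.contains d k || pvSkipP (pvMatch l ts pos) k) := by
  intro pos
  induction pos with
  | nil =>
    intro s d ts _ _ _ k
    simp [pvBucketLoop, pvMatch, pvSkipP]
  | cons i rest ih =>
    intro s d ts hb hsrt hst k
    have hb' : ∀ x ∈ rest, x < l.length := fun x hx => hb x (List.mem_cons_of_mem _ hx)
    have hsrt' : rest.Pairwise (· < ·) := List.Pairwise.of_cons hsrt
    have hil : i < l.length := hb i List.mem_cons_self
    have hfind : rest.find? (pvTailCondB l (pvSegLoop l 0) s i) = rest.find? (pvTailP l ts i) := by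
      apply pvFind?_congr
      intro j hj
      have hjl : j < l.length := hb' j hj
      unfold pvTailCondB pvTailP
      rw [hst j, pvSeg_getD l j hjl, pvSeg_getD l i hil]
    cases hcs : PySem.Set.contains s i with
    | true =>
      have hts : ts.contains i = true := by rw [← hst i]; exact hcs
      have hloop : pvBucketLoop l (pvSegLoop l 0) (s, d) (i :: rest)
          = pvBucketLoop l (pvSegLoop l 0) (s, d) rest := by
        show (if PySem.Set.contains s i then _ else _) = _
        rw [hcs]
        rfl
      rw [hloop, pvMatch_cons_skip _ _ _ _ hts]
      exact ih s d ts hb' hsrt' hst k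
    | false =>
      have hts : ts.contains i = false := by rw [← hst i]; exact hcs
      cases hhd : pvHeadCondB l i with
      | false =>
        have hloop : pvBucketLoop l (pvSegLoop l 0) (s, d) (i :: rest)
            = pvBucketLoop l (pvSegLoop l 0) (s, d) rest := by
          show (if PySem.Set.contains s i then _ else _) = _
          rw [hcs, hhd]
          rfl
        rw [hloop, pvMatch_cons_nohead _ _ _ _ hts hhd]
        exact ih s d ts hb' hsrt' hst k
      | true =>
        cases hfj : rest.find? (pvTailP l ts i) with
        | none =>
          have hfB : rest.find? (pvTailCondB l (pvSegLoop l 0) s i) = none := by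
            rw [hfind]; exact hfj
          have hloop : pvBucketLoop l (pvSegLoop l 0) (s, d) (i :: rest)
              = pvBucketLoop l (pvSegLoop l 0) (s, d) rest := by
            show (if PySem.Set.contains s i then _ else _) = _
            rw [hcs, hhd, hfB]
            rfl
          rw [hloop, pvMatch_cons_none _ _ _ _ hts hhd hfj]
          exact ih s d ts hb' hsrt' hst k
        | some j =>
          have hfB : rest.find? (pvTailCondB l (pvSegLoop l 0) s i) = some j := by
            rw [hfind]; exact hfj
          have hloop : pvBucketLoop l (pvSegLoop l 0) (s, d) (i :: rest)
              = pvBucketLoop l (pvSegLoop l 0)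
                  (PySem.Set.add s j, PySem.Set.update d [i-1, i, j-1, j]) rest := by
            show (if PySem.Set.contains s i then _ else _) = _
            rw [hcs, hhd, hfB]
            rfl
          have hmemj : j ∈ rest := List.mem_of_find?_eq_some hfj
          have hij : i < j := (List.pairwise_cons.mp hsrt).1 j hmemj
          have hi1 : 1 ≤ i := by
            have h := hhd
            rw [pvHeadCondB] at h
            simp only [Bool.and_eq_true, decide_eq_true_eq] at h
            exact h.1.1.1
          have hmemiff : ∀ x : Nat, x ∈ s ↔ x ∈ ts := by
            intro x
            have h := hst x
            rw [pvContains_eq, List.contains_eq_mem] at h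
            exact decide_eq_decide.mp h
          have hst' : ∀ x, PySem.Set.contains (PySem.Set.add s j) x = (ts ++ [j]).contains x := by
            intro x
            rw [pvContains_eq, List.contains_eq_mem]
            simp [PySem.Set.mem_add, hmemiff x, or_comm]
          rw [hloop, pvMatch_cons_found _ _ _ _ _ hts hhd hfj,
            ih (PySem.Set.add s j) _ (ts ++ [j]) hb' hsrt' hst' k, pvSkipP_cons]
          have hdu : PySem.Set.contains (PySem.Set.update d [i-1, i, j-1, j]) k
              = (PySem.Set.contains d k || (k+1 == i || k == i || k+1 == j || k == j)) := by
            rw [pvContains_eq, pvContains_eq, Bool.eq_iff_iff]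
            simp only [decide_eq_true_eq, PySem.Set.mem_update, List.mem_cons,
              List.not_mem_nil, or_false, Bool.or_eq_true, beq_iff_eq]
            constructor
            · rintro (h | h)
              · exact Or.inl h
              · exact Or.inr (by omega)
            · rintro (h | h)
              · exact Or.inl h
              · exact Or.inr (by omega)
          rw [hdu, Bool.or_assoc]

-- the fold over the buckets' values accumulates the per-bucket skip sets
lemma pvValuesFold (l : List String) :
    ∀ (vs : List (List Nat)) (d : PySem.Set Nat),
      (∀ pos ∈ vs, (∀ x ∈ pos, x < l.length) ∧ pos.Pairwise (· < ·)) →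
      ∀ k, PySem.Set.contains
          (vs.foldl (fun d pos => if pos.length < 2 then d
            else (pvBucketLoop l (pvSegLoop l 0) (PySem.Set.empty, d) pos).2) d) k
        = (PySem.Set.contains d k
            || vs.any (fun pos => !(decide (pos.length < 2)) && pvSkipP (pvMatch l [] pos) k)) := by
  intro vs
  induction vs with
  | nil => intro d _ k; simp
  | cons pos rest ih =>
    intro d hvs k
    rw [List.foldl_cons, List.any_cons]
    obtain ⟨hbnd, hsrt⟩ := hvs pos List.mem_cons_self
    have hrest := fun p hp => hvs p (List.mem_cons_of_mem _ hp)
    by_cases hlen : pos.length < 2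
    · rw [if_pos hlen, ih d hrest k]
      simp [hlen]
    · rw [if_neg hlen, ih _ hrest k,
        pvBucket_contains l pos PySem.Set.empty d [] hbnd hsrt (fun _ => rfl) k]
      simp only [hlen, decide_false, Bool.not_false, Bool.true_and]
      rw [Bool.or_assoc]

-- ===== VERDICT (by name: the statement is the Claim_ definition above) =====
lemma pvB_char (l : List String) :
    filter_repeat_num_alt l = (List.range l.length).filterMap
      (fun k => if PySem.Set.contains
          (((pvBuckets l).values).foldl (fun dropped pos => if pos.length < 2 then dropped
            else (pvBucketLoop l (pvSegLoop l 0) (PySem.Set.empty, dropped) pos).2)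
            PySem.Set.empty) k
        then none else some (l.getD k "")) := rfl

lemma pvValues_wf (l : List String) :
    ∀ pos ∈ (pvBuckets l).values, (∀ x ∈ pos, x < l.length) ∧ pos.Pairwise (· < ·) := by
  intro pos hpos
  rw [pvBuckets_values] at hpos
  obtain ⟨t, htk, rfl⟩ := List.mem_map.mp hpos
  obtain ⟨htemp, _⟩ := (pvBuckets_mem_keys l t).mp htk
  rw [pvBuckets_getD l t htemp]
  constructor
  · intro x hx
    exact ((mem_pvPosF _ _ _ _).mp hx).2.1
  · exact pvPosF_sorted l t 0

-- the dropped set of B and the pair list of A mark the same indices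
lemma pvDropped_eq_skip (l : List String) (k : Nat) :
    PySem.Set.contains
        (((pvBuckets l).values).foldl (fun dropped pos => if pos.length < 2 then dropped
          else (pvBucketLoop l (pvSegLoop l 0) (PySem.Set.empty, dropped) pos).2)
          PySem.Set.empty) k
      = pvSkipP (pvPairs l l.length) k := by
  rw [pvValuesFold l _ PySem.Set.empty (pvValues_wf l) k]
  rw [show PySem.Set.contains PySem.Set.empty k = false from rfl, Bool.false_or]
  rw [Bool.eq_iff_iff, List.any_eq_true]
  obtain ⟨_, _, hW, _, _⟩ := pvInv_holds l l.length
  unfold pvSkipP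
  rw [List.any_eq_true]
  constructor
  · rintro ⟨pos, hpos, hcond⟩
    rw [pvBuckets_values] at hpos
    obtain ⟨t, htk, rfl⟩ := List.mem_map.mp hpos
    obtain ⟨htemp, _⟩ := (pvBuckets_mem_keys l t).mp htk
    rw [pvBuckets_getD l t htemp] at hcond
    simp only [Bool.and_eq_true, Bool.not_eq_true', decide_eq_false_iff_not, not_lt] at hcond
    obtain ⟨hlen2, hskip⟩ := hcond
    have hcnt : 1 < PySem.List.count l t := by
      rw [← pvPosF_len l t]
      omega
    rw [← pvH_final l t htemp hcnt] at hskip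
    rw [List.any_eq_true] at hskip
    obtain ⟨p, hp, hpk⟩ := hskip
    exact ⟨p, List.mem_of_mem_filter hp, hpk⟩
  · rintro ⟨p, hp, hpk⟩
    have hw := hW p hp
    have htemp : PySem.Str.isIn "temp" (l.getD p.1 "") = true := hw.2.2.2.2.1
    have hcnt : 1 < PySem.List.count l (l.getD p.1 "") := hw.2.2.2.2.2.2.2.2
    have hp1len : p.1 < l.length := by
      have h2 := hw.2.1
      have h3 := hw.2.2.1
      omega
    have htk : (l.getD p.1 "") ∈ (pvBuckets l).keys :=
      (pvBuckets_mem_keys l _).mpr ⟨htemp, p.1, hp1len, rfl⟩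
    refine ⟨(pvBuckets l).getD (l.getD p.1 "") [], ?_, ?_⟩
    · rw [pvBuckets_values]
      exact List.mem_map.mpr ⟨_, htk, rfl⟩
    · rw [pvBuckets_getD l _ htemp]
      have hlen2 : ¬((pvPosF l (l.getD p.1 "") 0).length < 2) := by
        rw [pvPosF_len]
        omega
      rw [← pvH_final l _ htemp hcnt]
      simp only [hlen2, decide_false, Bool.not_false, Bool.true_and]
      rw [List.any_eq_true]
      refine ⟨p, ?_, hpk⟩
      unfold pvFT
      rw [List.mem_filter]
      exact ⟨hp, by simp⟩

-- ===== VERDICT (by name: the statement is the Claim_ definition above) =====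
theorem filter_repeat_num_spec : Claim_equal_filter_repeat_num := by
  intro l _
  unfold Spec_filter_repeat_num
  rw [pvA_char, pvB_char]
  apply List.filterMap_congr
  intro k _
  rw [pvDropped_eq_skip l k]
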